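-- pv_equiv track=rewrite | github.com/kumarmakala/insurance_ai_poc | app/ingest.py | _parse_reference
-- ===== SOURCE A (Python) =====
-- from typing import Any
--
-- def _as_cell(v: Any) -> Any:
--     """Normalize raw calamine cell values: empty string → None."""
--     if v is None:
--         return None
--     if isinstance(v, str) and not v.strip():
--         return None
--     return v
--
-- def _parse_reference(rows: list[list[Any]]) -> dict[str, list[str]]:
--     current: str | None = None
--     cats: dict[str, list[str]] = {}
--     for row in rows[1:] if len(rows) > 1 else []:
--         cat = _as_cell(row[0]) if len(row) > 0 else None
--         val = _as_cell(row[1]) if len(row) > 1 else None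
--         if cat:
--             current = str(cat).strip()
--             cats.setdefault(current, [])
--         if val and current:
--             cats[current].append(str(val).strip())
--     return cats
-- ===== SOURCE B (Python) =====
-- from typing import Any
--
-- def _as_cell(v: Any) -> Any:
--     """Normalize raw calamine cell values: empty string -> None."""
--     if v is None:
--         return None
--     if isinstance(v, str) and not v.strip():
--         return None
--     return v
--
-- def _parse_reference(rows: list[list[Any]]) -> dict[str, list[str]]:
--     tail = rows[1:]
--     # pass 1: forward-fill the governing category per row; register each new
--     # header as an empty-list key in first-seen order
--     cats: dict[str, list[str]] = {}
--     labels: list = []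
--     current = None
--     for row in tail:
--         cat = _as_cell(row[0]) if len(row) > 0 else None
--         if cat:
--             current = str(cat).strip()
--             cats.setdefault(current, [])
--         labels.append(current)
--     # pass 2: collect the values under their governing category
--     for row, cur in zip(tail, labels):
--         val = _as_cell(row[1]) if len(row) > 1 else None
--         if val and cur:
--             cats[cur].append(str(val).strip())
--     return cats
-- ===== Notes on version B (the rewrite author's own statement) =====
-- stated objective: alternative
-- what changed: Replaces A's single stateful fold that interleaves header registration and value collection with two separate passes: one that forward-fills each row's governing category and registers headers, and one that groups the values under those categories.
import Mathlib
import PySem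

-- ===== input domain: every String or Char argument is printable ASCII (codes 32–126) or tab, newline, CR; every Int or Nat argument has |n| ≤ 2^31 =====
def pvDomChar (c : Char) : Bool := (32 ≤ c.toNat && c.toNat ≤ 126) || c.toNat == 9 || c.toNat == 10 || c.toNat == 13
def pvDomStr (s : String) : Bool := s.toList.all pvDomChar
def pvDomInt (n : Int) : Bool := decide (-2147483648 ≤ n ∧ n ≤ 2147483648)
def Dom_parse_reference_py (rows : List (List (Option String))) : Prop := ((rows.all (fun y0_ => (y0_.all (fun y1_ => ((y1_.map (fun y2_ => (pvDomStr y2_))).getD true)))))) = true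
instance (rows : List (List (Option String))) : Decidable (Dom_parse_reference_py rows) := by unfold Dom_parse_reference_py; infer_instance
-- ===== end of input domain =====

-- B re-groups the rows in two passes (forward-fill categories, then collect values)
-- instead of A's single fold with interleaved dict updates; objective: alternative
-- decomposition, same cost.

-- ===== PORT A =====

-- _as_cell: None → None, blank string → None, else the value itself (cells are Option String here)
def pvAsCell (v : Option String) : Option String :=
  match v with
  | none => none
  | some s => if PySem.Str.strip s = "" then none else some s

-- loop body of A: state = (current, cats); `row[i] if len(row) > i else None` is the
-- guarded getD below (index nonnegative and in range, so exact)
def pvStepA (st : Option String × PySem.Dict String (List String))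
    (row : List (Option String)) : Option String × PySem.Dict String (List String) :=
  let cat := if 0 < row.length then pvAsCell (row.getD 0 none) else none
  let val := if 1 < row.length then pvAsCell (row.getD 1 none) else none
  let st' :=
    match cat with
    | some c =>
      let k := PySem.Str.strip c
      (some k, st.2.setdefault k [])
    | none => st
  match val, st'.1 with
  | some v, some k => (st'.1, st'.2.modify k [] (fun l => l ++ [PySem.Str.strip v]))
  | _, _ => st'

def parse_reference_py (rows : List (List (Option String))) : List (String × List String) :=
  (((if 1 < rows.length then rows.drop 1 else []).foldl pvStepA
      (none, PySem.Dict.empty)).2).items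

-- ===== PORT B =====

-- pass 1: forward-fill the governing category per row and register headers as
-- empty-list keys in first-seen order; returns (cats, labels)
def pvPass1 (rows : List (List (Option String))) (cur : Option String)
    (d : PySem.Dict String (List String)) :
    PySem.Dict String (List String) × List (Option String) :=
  match rows with
  | [] => (d, [])
  | row :: rest =>
    let cat := if 0 < row.length then pvAsCell (row.getD 0 none) else none
    match cat with
    | some c =>
      let k := PySem.Str.strip c
      let r := pvPass1 rest (some k) (d.setdefault k [])
      (r.1, some k :: r.2)
    | none =>
      let r := pvPass1 rest cur d
      (r.1, cur :: r.2)

-- pass 2 body: append the row's value (if any) under its governing category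
def pvStepB (d : PySem.Dict String (List String))
    (p : List (Option String) × Option String) : PySem.Dict String (List String) :=
  let val := if 1 < p.1.length then pvAsCell (p.1.getD 1 none) else none
  match val, p.2 with
  | some v, some k => d.modify k [] (fun l => l ++ [PySem.Str.strip v])
  | _, _ => d

def parse_reference_py_alt (rows : List (List (Option String))) : List (String × List String) :=
  let tail := rows.drop 1          -- rows[1:] (nonnegative slice, exact)
  let r := pvPass1 tail none PySem.Dict.empty
  ((tail.zip r.2).foldl pvStepB r.1).items

-- ===== PRECONDITION & SPEC =====
def Spec_parse_reference_py (rows : List (List (Option String))) (out : List (String × List String)) : Prop := out = parse_reference_py_alt rows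
instance (rows : List (List (Option String))) (out : List (String × List String)) : Decidable (Spec_parse_reference_py rows out) := by unfold Spec_parse_reference_py; infer_instance

-- ===== CLAIM (what is proved, stated in full; the proofs are below) =====
def Claim_equal_parse_reference_py : Prop := ∀ (rows : List (List (Option String))), Dom_parse_reference_py rows → Spec_parse_reference_py rows (parse_reference_py rows)

-- ===== LEMMAS AND PROOFS =====

-- membership in the dict is preserved by setdefault
lemma contains_setdefault (d : PySem.Dict String (List String)) (k k' : String)
    (v : List String) (h : d.contains k = true) :
    (d.setdefault k' v).contains k = true := by
  unfold PySem.Dict.setdefault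
  split
  · exact h
  · simp only [PySem.Dict.contains, List.any_append] at h ⊢
    simp [h]

-- setdefault makes its key present
lemma contains_setdefault_self (d : PySem.Dict String (List String)) (k : String)
    (v : List String) : (d.setdefault k v).contains k = true := by
  unfold PySem.Dict.setdefault
  split
  · assumption
  · simp [PySem.Dict.contains, List.any_append]

-- membership is preserved by modify
lemma contains_modify' (d : PySem.Dict String (List String)) (k k' : String)
    (f : List String → List String) (h : d.contains k = true) :
    (d.modify k' [] f).contains k = true := by
  unfold PySem.Dict.modify
  rw [PySem.Dict.contains_insert]
  simp [h]

-- get? of a present key is unchanged by appending a new entry at the end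
lemma get?_append_of_contains (d : PySem.Dict String (List String)) (k : String)
    (x : String × List String) (hk : d.contains k = true) :
    (PySem.Dict.mk (d.items ++ [x])).get? k = d.get? k := by
  simp only [PySem.Dict.get?, List.find?_append]
  have : (d.items.find? (fun p => p.1 == k)).isSome = true := by
    rw [List.find?_isSome]
    simpa [PySem.Dict.contains, List.any_eq_true] using hk
  obtain ⟨r, hr⟩ := Option.isSome_iff_exists.mp this
  simp [hr]

-- on a key already present, modify commutes with any later setdefault
lemma modify_setdefault_comm (d : PySem.Dict String (List String)) (k k' : String)
    (f : List String → List String) (v : List String) (hk : d.contains k = true) :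
    (d.modify k [] f).setdefault k' v = (d.setdefault k' v).modify k [] f := by
  by_cases h' : d.contains k' = true
  · -- k' already a key: setdefault is a no-op on both sides
    have h1 : (d.modify k [] f).contains k' = true := contains_modify' d k' k f h'
    unfold PySem.Dict.setdefault
    rw [if_pos h1, if_pos h']
  · -- k' new: it is appended at the end; the modified entry is unaffected
    have hkk : k' ≠ k := fun h => h' (by rw [h]; exact hk)
    have hne : (k' == k) = false := beq_eq_false_iff_ne.mpr hkk
    have h1 : (d.modify k [] f).contains k' = false := by
      unfold PySem.Dict.modify
      rw [PySem.Dict.contains_insert, hne]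
      simpa using h'
    have hk2 : (PySem.Dict.mk (d.items ++ [(k', v)])).contains k = true := by
      simp only [PySem.Dict.contains, List.any_append] at hk ⊢
      simp [hk]
    have hgd : (PySem.Dict.mk (d.items ++ [(k', v)])).getD k [] = d.getD k [] := by
      rw [PySem.Dict.getD_eq_get?_getD, PySem.Dict.getD_eq_get?_getD,
        get?_append_of_contains d k (k', v) hk]
    unfold PySem.Dict.setdefault
    rw [if_neg (by simp [h1]), if_neg (by simp [h'])]
    unfold PySem.Dict.modify PySem.Dict.insert
    rw [if_pos hk, if_pos hk2, hgd]
    simp only [List.map_append, List.map_cons, List.map_nil, hne, if_false,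
      Bool.false_eq_true]

-- the labels pass 1 computes do not depend on the dictionary accumulator
lemma pass1_labels_const (t : List (List (Option String))) :
    ∀ (cur : Option String) (d d' : PySem.Dict String (List String)),
      (pvPass1 t cur d).2 = (pvPass1 t cur d').2 := by
  induction t with
  | nil => intro cur d d'; rfl
  | cons row rest ih =>
    intro cur d d'
    unfold pvPass1
    cases h : (if 0 < row.length then pvAsCell (row.getD 0 none) else none) with
    | some c =>
      dsimp only
      rw [ih (some (PySem.Str.strip c)) (d.setdefault (PySem.Str.strip c) [])
        (d'.setdefault (PySem.Str.strip c) [])]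
    | none =>
      dsimp only
      rw [ih cur d d']

-- the dict pass 1 computes commutes with a prior modify of a present key
lemma pass1_modify (t : List (List (Option String))) :
    ∀ (cur : Option String) (d : PySem.Dict String (List String)) (k : String)
      (f : List String → List String), d.contains k = true →
      (pvPass1 t cur (d.modify k [] f)).1 = ((pvPass1 t cur d).1).modify k [] f := by
  induction t with
  | nil => intro cur d k f _; rfl
  | cons row rest ih =>
    intro cur d k f hk
    unfold pvPass1
    cases h : (if 0 < row.length then pvAsCell (row.getD 0 none) else none) with
    | some c =>
      dsimp only
      rw [modify_setdefault_comm d k (PySem.Str.strip c) f [] hk]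
      exact ih _ _ k f (contains_setdefault d k _ [] hk)
    | none =>
      dsimp only
      exact ih cur d k f hk

-- main invariant: A's fold equals B's two passes, for any start state whose
-- current category (if set) is already a key of the dict
lemma main_inv (t : List (List (Option String))) :
    ∀ (cur : Option String) (d : PySem.Dict String (List String)),
      (∀ k, cur = some k → d.contains k = true) →
      (t.foldl pvStepA (cur, d)).2 =
        (t.zip (pvPass1 t cur d).2).foldl pvStepB (pvPass1 t cur d).1 := by
  induction t with
  | nil => intro cur d _; rfl
  | cons row rest ih =>
    intro cur d hcd
    unfold pvPass1
    cases hcat : (if 0 < row.length then pvAsCell (row.getD 0 none) else none) with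
    | some c =>
      have hk1 : (d.setdefault (PySem.Str.strip c) []).contains (PySem.Str.strip c) = true :=
        contains_setdefault_self d _ []
      cases hval : (if 1 < row.length then pvAsCell (row.getD 1 none) else none) with
      | some v =>
        have hstep : pvStepA (cur, d) row =
            (some (PySem.Str.strip c),
              (d.setdefault (PySem.Str.strip c) []).modify (PySem.Str.strip c) []
                (fun l => l ++ [PySem.Str.strip v])) := by
          simp only [pvStepA, hcat, hval]
        simp only [List.foldl_cons, hstep, List.zip_cons_cons]
        rw [ih _ _ (by intro k hk; cases hk; exact contains_modify' _ _ _ _ hk1)]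
        rw [pass1_labels_const rest (some (PySem.Str.strip c)) _ (d.setdefault (PySem.Str.strip c) [])]
        rw [pass1_modify rest (some (PySem.Str.strip c)) _ _ _ hk1]
        have hstepB : ∀ D, pvStepB D (row, some (PySem.Str.strip c)) =
            D.modify (PySem.Str.strip c) [] (fun l => l ++ [PySem.Str.strip v]) := by
          intro D; simp only [pvStepB, hval]
        rw [hstepB]
      | none =>
        have hstep : pvStepA (cur, d) row =
            (some (PySem.Str.strip c), d.setdefault (PySem.Str.strip c) []) := by
          simp only [pvStepA, hcat, hval]
        simp only [List.foldl_cons, hstep, List.zip_cons_cons]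
        rw [ih _ _ (by intro k hk; cases hk; exact hk1)]
        have hstepB : ∀ D, pvStepB D (row, some (PySem.Str.strip c)) = D := by
          intro D; simp only [pvStepB, hval]
        rw [hstepB]
    | none =>
      cases hval : (if 1 < row.length then pvAsCell (row.getD 1 none) else none) with
      | some v =>
        cases cur with
        | some k0 =>
          have hk0 : d.contains k0 = true := hcd k0 rfl
          have hstep : pvStepA (some k0, d) row =
              (some k0, d.modify k0 [] (fun l => l ++ [PySem.Str.strip v])) := by
            simp only [pvStepA, hcat, hval]
          simp only [List.foldl_cons, hstep, List.zip_cons_cons]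
          rw [ih _ _ (by intro k hk; cases hk; exact contains_modify' _ _ _ _ hk0)]
          rw [pass1_labels_const rest (some k0) _ d]
          rw [pass1_modify rest (some k0) _ _ _ hk0]
          have hstepB : ∀ D, pvStepB D (row, some k0) =
              D.modify k0 [] (fun l => l ++ [PySem.Str.strip v]) := by
            intro D; simp only [pvStepB, hval]
          rw [hstepB]
        | none =>
          have hstep : pvStepA (none, d) row = (none, d) := by
            simp only [pvStepA, hcat, hval]
          simp only [List.foldl_cons, hstep, List.zip_cons_cons]
          rw [ih _ _ (by intro k hk; cases hk)]
          have hstepB : ∀ D, pvStepB D (row, (none : Option String)) = D := by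
            intro D; simp only [pvStepB, hval]
          rw [hstepB]
      | none =>
        have hstep : pvStepA (cur, d) row = (cur, d) := by
          simp only [pvStepA, hcat, hval]
        simp only [List.foldl_cons, hstep, List.zip_cons_cons]
        rw [ih _ _ hcd]
        have hstepB : ∀ D, pvStepB D (row, cur) = D := by
          intro D; simp only [pvStepB, hval]
        rw [hstepB]

-- ===== VERDICT (by name: the statement is the Claim_ definition above) =====
theorem parse_reference_py_spec : Claim_equal_parse_reference_py := by
  intro rows _
  unfold Spec_parse_reference_py parse_reference_py parse_reference_py_alt
  have htail : (if 1 < rows.length then rows.drop 1 else []) = rows.drop 1 := by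
    split
    · rfl
    · rename_i h
      rw [List.drop_eq_nil_of_le (by omega)]
  rw [htail]
  rw [main_inv (rows.drop 1) none PySem.Dict.empty (by intro k h; cases h)]
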